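-- pv_equiv track=rewrite | github.com/beecave-homelab/sanitize-text | scripts/extract_dutch_firstnames.py | dedupe_preserve_case
-- ===== SOURCE A (Python) =====
-- def dedupe_preserve_case(names: list[str]) -> list[str]:
--     """Deduplicate name values case-insensitively.
--
--     The first occurrence of a specific case-insensitive name is preserved and
--     the final result list is sorted in a case-insensitive way.
--
--     Args:
--         names: The list of (possibly duplicate) name strings.
--
--     Returns:
--         A sorted list of unique name strings.
--     """
--     seen: dict[str, str] = {}
--     result: list[str] = []
--
--     for item in names:
--         key = item.casefold()
--         if key not in seen:
--             seen[key] = item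
--             result.append(item)
--
--     return sorted(result, key=lambda value: value.casefold())
-- ===== SOURCE B (Python) =====
-- def dedupe_preserve_case(names: list[str]) -> list[str]:
--     """Case-insensitive dedupe keeping the first occurrence's casing, sorted case-insensitively.
--
--     Sorts first (stably, so the first original occurrence of each casefolded
--     key comes first in its run), then drops adjacent duplicates in one pass.
--     """
--     ordered = sorted(names, key=str.casefold)
--     out: list[str] = []
--     prev = None
--     for item in ordered:
--         key = item.casefold()
--         if prev is None or key != prev:
--             out.append(item)
--             prev = key
--     return out
-- ===== Notes on version B (the rewrite author's own statement) =====
-- stated objective: alternative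
-- what changed: Replaces the seen-dict first-occurrence pass followed by a sort with a single stable sort of the whole list by casefold followed by one adjacent-duplicate-dropping pass (stability keeps the first occurrence's casing).
import Mathlib
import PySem

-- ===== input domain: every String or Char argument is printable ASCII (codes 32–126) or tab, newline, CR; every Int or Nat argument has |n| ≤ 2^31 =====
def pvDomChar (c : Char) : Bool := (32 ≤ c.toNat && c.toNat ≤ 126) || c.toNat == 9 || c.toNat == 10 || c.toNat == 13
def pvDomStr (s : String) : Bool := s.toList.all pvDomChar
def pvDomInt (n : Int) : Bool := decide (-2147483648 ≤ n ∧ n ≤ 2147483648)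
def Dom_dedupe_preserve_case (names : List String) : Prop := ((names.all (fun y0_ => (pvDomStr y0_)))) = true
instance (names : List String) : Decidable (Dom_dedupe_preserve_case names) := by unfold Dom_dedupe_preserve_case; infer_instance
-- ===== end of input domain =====

-- B replaces A's seen-dict first-occurrence pass + final sort by one stable sort by casefold
-- followed by an adjacent-duplicate-dropping pass (objective: alternative algorithm).

-- shared helper: Python's str.casefold, which on the printable-ASCII domain equals str.lower
def pvKey (s : String) : String := PySem.Str.lower s

-- ===== PORT A =====
def dedupe_preserve_case (names : List String) : List String :=
  let st := names.foldl
    (fun (st : PySem.Dict String String × List String) item =>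
      let key := pvKey item
      if st.1.contains key = false then (st.1.insert key item, st.2 ++ [item]) else st)
    (PySem.Dict.empty, [])
  PySem.List.sorted st.2 (fun value => pvKey value)

-- ===== PORT B =====
def dedupe_preserve_case_alt (names : List String) : List String :=
  let ordered := PySem.List.sorted names (fun value => pvKey value)
  (ordered.foldl
    (fun (st : List String × Option String) item =>
      let key := pvKey item
      match st.2 with
      | none => (st.1 ++ [item], some key)
      | some p => if key ≠ p then (st.1 ++ [item], some key) else st)
    ([], none)).1

-- ===== PRECONDITION & SPEC =====
def Spec_dedupe_preserve_case (names : List String) (out : List String) : Prop := out = dedupe_preserve_case_alt names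
instance (names : List String) (out : List String) : Decidable (Spec_dedupe_preserve_case names out) := by unfold Spec_dedupe_preserve_case; infer_instance

-- ===== CLAIM (what is proved, stated in full; the proofs are below) =====
def Claim_equal_dedupe_preserve_case : Prop := ∀ (names : List String), Dom_dedupe_preserve_case names → Spec_dedupe_preserve_case names (dedupe_preserve_case names)

-- ===== LEMMAS AND PROOFS =====

-- A's loop body, named (definitionally the lambda in the port)
def stepA (st : PySem.Dict String String × List String) (item : String) :
    PySem.Dict String String × List String :=
  let key := pvKey item
  if st.1.contains key = false then (st.1.insert key item, st.2 ++ [item]) else st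

-- B's loop body, named (definitionally the lambda in the port)
def stepB (st : List String × Option String) (item : String) : List String × Option String :=
  let key := pvKey item
  match st.2 with
  | none => (st.1 ++ [item], some key)
  | some p => if key ≠ p then (st.1 ++ [item], some key) else st

-- the pure-list form of A's accumulation loop (the dict is just the set of kept keys)
def stepF (r : List String) (item : String) : List String :=
  if pvKey item ∈ r.map pvKey then r else r ++ [item]

-- recursive form of B's adjacent-dedup loop
def adjRec : Option String → List String → List String
  | _, [] => []
  | none, x :: xs => x :: adjRec (some (pvKey x)) xs
  | some p, x :: xs => if pvKey x ≠ p then x :: adjRec (some (pvKey x)) xs else adjRec (some p) xs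

-- first element of m whose key is c
def fk (c : String) (m : List String) : Option String :=
  m.find? (fun y => decide (pvKey y = c))

theorem stepA_mem (seen : PySem.Dict String String) (r : List String) (a : String)
    (h : seen.contains (pvKey a) = true) : stepA (seen, r) a = (seen, r) := by
  simp [stepA, h]

theorem stepA_new (seen : PySem.Dict String String) (r : List String) (a : String)
    (h : seen.contains (pvKey a) = false) :
    stepA (seen, r) a = (seen.insert (pvKey a) a, r ++ [a]) := by
  simp [stepA, h]

theorem stepB_none (out : List String) (a : String) :
    stepB (out, none) a = (out ++ [a], some (pvKey a)) := rfl

theorem stepB_ne (out : List String) (p a : String) (h : pvKey a ≠ p) :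
    stepB (out, some p) a = (out ++ [a], some (pvKey a)) := by
  simp [stepB, h]

theorem stepB_eq (out : List String) (p a : String) (h : pvKey a = p) :
    stepB (out, some p) a = (out, some p) := by
  simp [stepB, h]

theorem adjRec_cons_none (x : String) (xs : List String) :
    adjRec none (x :: xs) = x :: adjRec (some (pvKey x)) xs := rfl

theorem adjRec_cons_ne (p x : String) (xs : List String) (h : pvKey x ≠ p) :
    adjRec (some p) (x :: xs) = x :: adjRec (some (pvKey x)) xs := by
  simp [adjRec, h]

theorem adjRec_cons_eq (p x : String) (xs : List String) (h : pvKey x = p) :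
    adjRec (some p) (x :: xs) = adjRec (some p) xs := by
  simp [adjRec, h]

theorem fk_cons_pos {c y : String} (ys : List String) (h : pvKey y = c) :
    fk c (y :: ys) = some y := by
  simp [fk, List.find?, h]

theorem fk_cons_neg {c y : String} (ys : List String) (h : pvKey y ≠ c) :
    fk c (y :: ys) = fk c ys := by
  simp [fk, List.find?, h]

theorem insBy_pos (a b : String) (ys : List String) (h : pvKey a < pvKey b) :
    PySem.List.insertBy (fun x z => decide (pvKey x < pvKey z)) a (b :: ys) = a :: b :: ys := by
  simp [PySem.List.insertBy, h]

theorem insBy_neg (a b : String) (ys : List String) (h : ¬ pvKey a < pvKey b) :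
    PySem.List.insertBy (fun x z => decide (pvKey x < pvKey z)) a (b :: ys)
      = b :: PySem.List.insertBy (fun x z => decide (pvKey x < pvKey z)) a ys := by
  simp [PySem.List.insertBy, h]

-- A's loop computes the stepF fold (the dict is just the set of kept keys)
theorem bridgeA : ∀ (l : List String) (seen : PySem.Dict String String) (r : List String),
    (∀ c, seen.contains c = decide (c ∈ r.map pvKey)) →
    (List.foldl stepA (seen, r) l).2 = List.foldl stepF r l := by
  intro l
  induction l with
  | nil => intro seen r _; rfl
  | cons a l ih =>
    intro seen r hinv
    rw [List.foldl_cons, List.foldl_cons]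
    by_cases hm : pvKey a ∈ r.map pvKey
    · rw [stepA_mem _ _ _ (by rw [hinv]; simp [hm]),
        show stepF r a = r from by simp [stepF, hm]]
      exact ih seen r hinv
    · rw [stepA_new _ _ _ (by rw [hinv]; simp [hm]),
        show stepF r a = r ++ [a] from by simp [stepF, hm]]
      refine ih _ _ (fun c => ?_)
      rw [PySem.Dict.contains_insert, hinv c]
      by_cases hc : c = pvKey a <;> simp [hc]

-- B's loop computes adjRec
theorem bridgeB : ∀ (l out : List String) (prev : Option String),
    (List.foldl stepB (out, prev) l).1 = out ++ adjRec prev l := by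
  intro l
  induction l with
  | nil => intro out prev; simp [adjRec]
  | cons a l ih =>
    intro out prev
    cases prev with
    | none =>
      rw [List.foldl_cons, stepB_none, ih, adjRec_cons_none]
      simp
    | some p =>
      by_cases h : pvKey a ≠ p
      · rw [List.foldl_cons, stepB_ne _ _ _ h, ih, adjRec_cons_ne _ _ _ h]
        simp
      · have h' : pvKey a = p := not_not.mp h
        rw [List.foldl_cons, stepB_eq _ _ _ h', ih, adjRec_cons_eq _ _ _ h']

-- inserting a into a key-sorted list keeps the first element with key c …
theorem insfind_some : ∀ (m : List String) (a y c : String),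
    m.Pairwise (fun x z => pvKey x ≤ pvKey z) → fk c m = some y →
    fk c (PySem.List.insertBy (fun x z => decide (pvKey x < pvKey z)) a m) = some y := by
  intro m
  induction m with
  | nil => intro a y c _ h; simp [fk] at h
  | cons b m ih =>
    intro a y c hpw hfind
    obtain ⟨hb, hpw'⟩ := List.pairwise_cons.mp hpw
    by_cases hlt : pvKey a < pvKey b
    · rw [insBy_pos a b m hlt]
      have hane : pvKey a ≠ c := by
        intro hac
        have hfind' : List.find? (fun z => decide (pvKey z = c)) (b :: m) = some y := hfind
        have hmem : y ∈ b :: m := List.mem_of_find?_eq_some hfind'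
        have hpy := List.find?_some hfind'
        have hyc : pvKey y = c := by simpa using hpy
        have hby : pvKey b ≤ pvKey y := by
          rcases List.mem_cons.mp hmem with rfl | h
          · exact le_rfl
          · exact hb y h
        rw [hyc, ← hac] at hby
        exact absurd hlt (not_lt.mpr hby)
      rw [fk_cons_neg _ hane]
      exact hfind
    · rw [insBy_neg a b m hlt]
      by_cases hbc : pvKey b = c
      · rw [fk_cons_pos _ hbc] at hfind ⊢
        exact hfind
      · rw [fk_cons_neg _ hbc] at hfind ⊢
        exact ih a y c hpw' hfind

-- … and if there is none, a becomes the match exactly when its key is c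
theorem insfind_none : ∀ (m : List String) (a c : String),
    fk c m = none →
    fk c (PySem.List.insertBy (fun x z => decide (pvKey x < pvKey z)) a m)
      = if pvKey a = c then some a else none := by
  intro m
  induction m with
  | nil =>
    intro a c _
    by_cases h : pvKey a = c <;> simp [fk, PySem.List.insertBy, List.find?, h]
  | cons b m ih =>
    intro a c hfind
    by_cases hbc : pvKey b = c
    · rw [fk_cons_pos _ hbc] at hfind
      cases hfind
    · rw [fk_cons_neg _ hbc] at hfind
      by_cases hlt : pvKey a < pvKey b
      · rw [insBy_pos a b m hlt]
        by_cases hac : pvKey a = c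
        · rw [fk_cons_pos _ hac]
          simp [hac]
        · rw [fk_cons_neg _ hac, fk_cons_neg _ hbc, hfind]
          simp [hac]
      · rw [insBy_neg a b m hlt, fk_cons_neg _ hbc]
        exact ih a c hfind

-- stability: the first element of sorted(l) with key c is the first element of l with key c
theorem stab : ∀ (l : List String) (c : String),
    fk c (PySem.List.sorted l pvKey) = fk c l := by
  intro l
  induction l using List.reverseRecOn with
  | nil => intro c; simp [fk, PySem.List.sorted]
  | append_singleton l a ih =>
    intro c
    have hsplit : PySem.List.sorted (l ++ [a]) pvKey
        = PySem.List.insertBy (fun x z => decide (pvKey x < pvKey z)) a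
            (PySem.List.sorted l pvKey) := by
      rw [PySem.List.sorted_eq_foldl_insertBy, List.foldl_append,
        ← PySem.List.sorted_eq_foldl_insertBy]
      rfl
    rw [hsplit]
    have hpw := PySem.List.sorted_pairwise l pvKey
    cases hres : fk c (PySem.List.sorted l pvKey) with
    | some y =>
      rw [insfind_some _ a y c hpw hres]
      have hl : List.find? (fun z => decide (pvKey z = c)) l = some y := by
        rw [show List.find? (fun z => decide (pvKey z = c)) l = fk c l from rfl, ← ih c]
        exact hres
      simp [fk, List.find?_append, hl]
    | none =>
      rw [insfind_none _ a c hres]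
      have hl : List.find? (fun z => decide (pvKey z = c)) l = none := by
        rw [show List.find? (fun z => decide (pvKey z = c)) l = fk c l from rfl, ← ih c]
        exact hres
      have hstep : fk c (l ++ [a]) = fk c [a] := by
        simp [fk, List.find?_append, hl]
      rw [hstep]
      by_cases hac : pvKey a = c
      · rw [fk_cons_pos _ hac]
        simp [hac]
      · rw [fk_cons_neg _ hac]
        simp [fk, hac]

-- membership in A's dedup fold: first occurrence of the key, unless the key is already kept
theorem memF : ∀ (l r : List String) (x : String),
    x ∈ List.foldl stepF r l ↔ x ∈ r ∨ (pvKey x ∉ r.map pvKey ∧ fk (pvKey x) l = some x) := by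
  intro l
  induction l with
  | nil => intro r x; simp [fk]
  | cons a l ih =>
    intro r x
    rw [List.foldl_cons]
    by_cases hm : pvKey a ∈ r.map pvKey
    · rw [show stepF r a = r from by simp [stepF, hm], ih]
      constructor
      · rintro (h | ⟨hn, hf⟩)
        · exact Or.inl h
        · have hax : pvKey a ≠ pvKey x := fun he => hn (he ▸ hm)
          exact Or.inr ⟨hn, by rw [fk_cons_neg _ hax]; exact hf⟩
      · rintro (h | ⟨hn, hf⟩)
        · exact Or.inl h
        · have hax : pvKey a ≠ pvKey x := fun he => hn (he ▸ hm)
          rw [fk_cons_neg _ hax] at hf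
          exact Or.inr ⟨hn, hf⟩
    · rw [show stepF r a = r ++ [a] from by simp [stepF, hm], ih]
      by_cases hax : pvKey a = pvKey x
      · have hxn : pvKey x ∉ r.map pvKey := fun h => hm (hax ▸ h)
        rw [fk_cons_pos _ hax]
        constructor
        · rintro (h | ⟨hn, _⟩)
          · rcases List.mem_append.mp h with h | h
            · exact Or.inl h
            · have hxa : x = a := by simpa using h
              subst hxa
              exact Or.inr ⟨hxn, rfl⟩
          · exact absurd (by simp [← hax]) hn
        · rintro (h | ⟨_, hf⟩)
          · exact Or.inl (List.mem_append.mpr (Or.inl h))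
          · obtain rfl : a = x := Option.some.inj hf
            exact Or.inl (List.mem_append.mpr (Or.inr (by simp)))
      · rw [fk_cons_neg _ hax]
        constructor
        · rintro (h | ⟨hn, hf⟩)
          · rcases List.mem_append.mp h with h | h
            · exact Or.inl h
            · have hxa : x = a := by simpa using h
              subst hxa
              exact absurd rfl hax
          · have hxn : pvKey x ∉ r.map pvKey := fun hc => hn (by simp [hc])
            exact Or.inr ⟨hxn, hf⟩
        · rintro (h | ⟨hn, hf⟩)
          · exact Or.inl (List.mem_append.mpr (Or.inl h))
          · refine Or.inr ⟨?_, hf⟩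
            intro hc
            rcases (by simpa using hc : pvKey x ∈ r.map pvKey ∨ pvKey x = pvKey a) with h1 | h1
            · exact hn h1
            · exact hax h1.symm

-- membership in B's adjacent dedup of a key-sorted list: the first element with that key
theorem memAdj : ∀ (l : List String) (prev : Option String) (x : String),
    l.Pairwise (fun a b => pvKey a ≤ pvKey b) →
    (∀ p, prev = some p → ∀ y ∈ l, p ≤ pvKey y) →
    (x ∈ adjRec prev l ↔ (∀ p, prev = some p → pvKey x ≠ p) ∧ fk (pvKey x) l = some x) := by
  intro l
  induction l with
  | nil => intro prev x _ _; simp [adjRec, fk]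
  | cons a l ih =>
    intro prev x hpw hlb
    obtain ⟨ha, hpw'⟩ := List.pairwise_cons.mp hpw
    cases prev with
    | none =>
      rw [adjRec_cons_none, List.mem_cons,
        ih (some (pvKey a)) x hpw' (fun p hp y hy => by cases hp; exact ha y hy)]
      constructor
      · rintro (rfl | ⟨hne, hf⟩)
        · exact ⟨by simp, fk_cons_pos _ rfl⟩
        · have hxa : pvKey x ≠ pvKey a := hne _ rfl
          exact ⟨by simp, by rw [fk_cons_neg _ (fun h => hxa h.symm)]; exact hf⟩
      · rintro ⟨-, hf⟩
        by_cases hax : pvKey a = pvKey x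
        · rw [fk_cons_pos _ hax] at hf
          exact Or.inl (Option.some.inj hf).symm
        · rw [fk_cons_neg _ hax] at hf
          exact Or.inr ⟨fun p hp => by cases hp; exact fun h => hax h.symm, hf⟩
    | some p =>
      have hpa : p ≤ pvKey a := hlb p rfl a (List.mem_cons_self)
      by_cases hk : pvKey a ≠ p
      · have hplt : p < pvKey a := lt_of_le_of_ne hpa (fun h => hk h.symm)
        rw [adjRec_cons_ne _ _ _ hk, List.mem_cons,
          ih (some (pvKey a)) x hpw' (fun q hq y hy => by cases hq; exact ha y hy)]
        constructor
        · rintro (rfl | ⟨hne, hf⟩)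
          · exact ⟨fun q hq => by cases hq; exact hk, fk_cons_pos _ rfl⟩
          · have hxa : pvKey x ≠ pvKey a := hne _ rfl
            have hxmem : x ∈ l := List.mem_of_find?_eq_some hf
            have hxge : pvKey a ≤ pvKey x := ha x hxmem
            refine ⟨fun q hq => ?_, by rw [fk_cons_neg _ (fun h => hxa h.symm)]; exact hf⟩
            cases hq
            exact fun h => absurd (h ▸ hxge) (not_le.mpr hplt)
        · rintro ⟨hne, hf⟩
          by_cases hax : pvKey a = pvKey x
          · rw [fk_cons_pos _ hax] at hf
            exact Or.inl (Option.some.inj hf).symm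
          · rw [fk_cons_neg _ hax] at hf
            exact Or.inr ⟨fun q hq => by cases hq; exact fun h => hax h.symm, hf⟩
      · have hk : pvKey a = p := not_not.mp hk
        rw [adjRec_cons_eq _ _ _ hk,
          ih (some p) x hpw'
            (fun q hq y hy => by cases hq; exact le_trans (le_of_eq hk.symm) (ha y hy))]
        constructor
        · rintro ⟨hne, hf⟩
          have hxp : pvKey x ≠ p := hne _ rfl
          have hxa : pvKey a ≠ pvKey x := fun h => hxp (h ▸ hk)
          exact ⟨hne, by rw [fk_cons_neg _ hxa]; exact hf⟩
        · rintro ⟨hne, hf⟩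
          have hxp : pvKey x ≠ p := hne _ rfl
          have hxa : pvKey a ≠ pvKey x := fun h => hxp (h ▸ hk)
          rw [fk_cons_neg _ hxa] at hf
          exact ⟨hne, hf⟩

-- B's output from a key-sorted input is strictly increasing in the key
theorem adj_pairwise : ∀ (l : List String) (prev : Option String),
    l.Pairwise (fun a b => pvKey a ≤ pvKey b) →
    (∀ p, prev = some p → ∀ y ∈ l, p ≤ pvKey y) →
    (adjRec prev l).Pairwise (fun a b => pvKey a < pvKey b) ∧
      (∀ y ∈ adjRec prev l, ∀ p, prev = some p → p < pvKey y) := by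
  intro l
  induction l with
  | nil => intro prev _ _; simp [adjRec]
  | cons a l ih =>
    intro prev hpw hlb
    obtain ⟨ha, hpw'⟩ := List.pairwise_cons.mp hpw
    have hrec := ih (some (pvKey a)) hpw' (fun q hq y hy => by cases hq; exact ha y hy)
    have hkeep : (a :: adjRec (some (pvKey a)) l).Pairwise (fun u v => pvKey u < pvKey v) :=
      List.pairwise_cons.mpr ⟨fun y hy => hrec.2 y hy (pvKey a) rfl, hrec.1⟩
    cases prev with
    | none =>
      rw [adjRec_cons_none]
      exact ⟨hkeep, fun y _ q hq => by cases hq⟩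
    | some p =>
      have hpa : p ≤ pvKey a := hlb p rfl a (List.mem_cons_self)
      by_cases hk : pvKey a ≠ p
      · have hplt : p < pvKey a := lt_of_le_of_ne hpa (fun h => hk h.symm)
        rw [adjRec_cons_ne _ _ _ hk]
        refine ⟨hkeep, ?_⟩
        rintro y hy q hq
        cases hq
        rcases List.mem_cons.mp hy with rfl | hy
        · exact hplt
        · exact lt_trans hplt (hrec.2 y hy (pvKey a) rfl)
      · have hk : pvKey a = p := not_not.mp hk
        rw [adjRec_cons_eq _ _ _ hk]
        exact ih (some p) hpw' (fun q hq y hy => by cases hq; exact le_trans (le_of_eq hk.symm) (ha y hy))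

-- the kept keys of A's fold stay distinct
theorem nodupF : ∀ (l r : List String),
    (r.map pvKey).Nodup → ((List.foldl stepF r l).map pvKey).Nodup := by
  intro l
  induction l with
  | nil => intro r h; exact h
  | cons a l ih =>
    intro r h
    rw [List.foldl_cons]
    by_cases hm : pvKey a ∈ r.map pvKey
    · rw [show stepF r a = r from by simp [stepF, hm]]
      exact ih r h
    · rw [show stepF r a = r ++ [a] from by simp [stepF, hm]]
      apply ih
      simp [List.nodup_append, h]
      intro b hb hba
      exact hm (by rw [← hba]; exact List.mem_map_of_mem (f := pvKey) hb)

theorem main_eq : ∀ (names : List String),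
    dedupe_preserve_case names = dedupe_preserve_case_alt names := by
  intro names
  have hA : dedupe_preserve_case names
      = PySem.List.sorted (List.foldl stepF [] names) pvKey := by
    show PySem.List.sorted (List.foldl stepA (PySem.Dict.empty, ([] : List String)) names).2 pvKey = _
    rw [bridgeA names PySem.Dict.empty [] (fun c => by simp [PySem.Dict.contains_empty])]
  have hB : dedupe_preserve_case_alt names
      = adjRec none (PySem.List.sorted names pvKey) := by
    show (List.foldl stepB ([], none) (PySem.List.sorted names pvKey)).1 = _
    rw [bridgeB (PySem.List.sorted names pvKey) [] none]
    simp
  rw [hA, hB]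
  have hsp := PySem.List.sorted_pairwise names pvKey
  have hlb : ∀ p : String, (none : Option String) = some p →
      ∀ y ∈ PySem.List.sorted names pvKey, p ≤ pvKey y := by
    intro p hp; cases hp
  obtain ⟨hpw, -⟩ := adj_pairwise (PySem.List.sorted names pvKey) none hsp hlb
  apply PySem.List.sorted_eq_of_perm_of_pairwise_lt _ _ pvKey ?_ hpw
  have nd1 : (adjRec none (PySem.List.sorted names pvKey)).Nodup :=
    hpw.imp (fun h => by rintro rfl; exact lt_irrefl _ h)
  have nd2 : (List.foldl stepF [] names).Nodup :=
    List.Nodup.of_map pvKey (nodupF names [] (by simp))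
  rw [List.perm_ext_iff_of_nodup nd1 nd2]
  intro x
  rw [memAdj (PySem.List.sorted names pvKey) none x hsp hlb, memF names [] x, stab]
  simp

-- ===== VERDICT (by name: the statement is the Claim_ definition above) =====
theorem dedupe_preserve_case_spec : Claim_equal_dedupe_preserve_case := by
  intro names _
  unfold Spec_dedupe_preserve_case
  exact main_eq names
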